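-- pv_equiv track=rewrite | github.com/Bhavil2/Second | XGBoost.py | map_diag_code
-- ===== SOURCE A (Python) =====
-- diag_categories = {
--     'Infection_&_Parasitic': range(0, 140), 'Neoplasm': range(140, 240),
--     'Endocrine_Nutritional_Immunity': range(240, 280), 'Blood': range(280, 290),
--     'Mental_&_Behavioral': range(290, 320), 'Nervous': range(320, 390),
--     'Circulatory': range(390, 460), 'Respiratory': range(460, 520),
--     'Digestive': range(520, 580), 'Genitourinary': range(580, 630),
--     'Complications_Pregnancy_Childbirth': range(630, 680), 'Skin': range(680, 710),
--     'Musculoskeletal': range(710, 740), 'Congenital_Anomaly': range(740, 760),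
--     'Perinatal_Conditions': range(760, 780), 'Symptoms_&_Ill-defined': range(780, 800),
--     'Injury_&_Poisining': range(800, 1000),
--     'Supplementary_V_Codes': 'V', 'Supplementary_E_Codes': 'E'
-- }
--
-- def map_diag_code(code):
--     """Maps an ICD-9 code to its category."""
--     if not code or not isinstance(code, str) or code.strip() in ['00000', '']:
--         return None
--     if code.startswith('V'):
--         return 'Supplementary_V_Codes'
--     if code.startswith('E'):
--         return 'Supplementary_E_Codes'
--     try:
--         # Convert the numeric part of the code to an integer for range checking
--         code_num = int(code[:3])
--         for category, code_range in diag_categories.items():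
--             if isinstance(code_range, range) and code_num in code_range:
--                 return category
--     except (ValueError, TypeError):
--         return None
--     return 'Other'
-- ===== SOURCE B (Python) =====
-- _BOUNDS = [0, 140, 240, 280, 290, 320, 390, 460, 520, 580,
--            630, 680, 710, 740, 760, 780, 800, 1000]
-- _NAMES = ['Infection_&_Parasitic', 'Neoplasm', 'Endocrine_Nutritional_Immunity',
--           'Blood', 'Mental_&_Behavioral', 'Nervous', 'Circulatory', 'Respiratory',
--           'Digestive', 'Genitourinary', 'Complications_Pregnancy_Childbirth',
--           'Skin', 'Musculoskeletal', 'Congenital_Anomaly', 'Perinatal_Conditions',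
--           'Symptoms_&_Ill-defined', 'Injury_&_Poisining']
--
-- def map_diag_code(code):
--     """Maps an ICD-9 code to its category (binary search over range boundaries)."""
--     if not code or not isinstance(code, str) or code.strip() in ['00000', '']:
--         return None
--     if code.startswith('V'):
--         return 'Supplementary_V_Codes'
--     if code.startswith('E'):
--         return 'Supplementary_E_Codes'
--     try:
--         code_num = int(code[:3])
--     except (ValueError, TypeError):
--         return None
--     # hand-rolled bisect_right (A imports nothing, so no bisect module)
--     lo, hi = 0, len(_BOUNDS)
--     while lo < hi:
--         mid = (lo + hi) // 2
--         if _BOUNDS[mid] <= code_num: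
--             lo = mid + 1
--         else:
--             hi = mid
--     i = lo - 1
--     if 0 <= i < len(_NAMES):
--         return _NAMES[i]
--     return 'Other'
-- ===== Notes on version B (the rewrite author's own statement) =====
-- stated objective: alternative
-- what changed: Replaces the linear scan over a dict of 17 range objects with a hand-rolled bisect_right binary search over a sorted boundary list indexing a parallel name list.
import Mathlib
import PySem

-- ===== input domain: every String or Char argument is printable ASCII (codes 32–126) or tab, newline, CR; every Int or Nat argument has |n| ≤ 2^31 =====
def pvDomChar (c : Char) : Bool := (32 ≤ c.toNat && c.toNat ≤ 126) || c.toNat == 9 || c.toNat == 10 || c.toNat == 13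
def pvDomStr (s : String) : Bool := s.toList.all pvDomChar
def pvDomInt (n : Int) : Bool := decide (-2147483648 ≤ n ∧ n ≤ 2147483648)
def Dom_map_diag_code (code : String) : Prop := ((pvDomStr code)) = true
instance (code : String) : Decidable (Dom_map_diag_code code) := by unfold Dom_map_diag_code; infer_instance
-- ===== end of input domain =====

-- B replaces A's linear scan over a dict of range objects by a hand-rolled
-- bisect_right binary search over a sorted boundary list (alternative algorithm).

-- ===== PORT A =====
-- the module-level dict: insertion order kept; the two string-valued entries carry `none`
def diagCategories : List (String × Option (Int × Int)) :=
  [("Infection_&_Parasitic", some (0, 140)), ("Neoplasm", some (140, 240)),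
   ("Endocrine_Nutritional_Immunity", some (240, 280)), ("Blood", some (280, 290)),
   ("Mental_&_Behavioral", some (290, 320)), ("Nervous", some (320, 390)),
   ("Circulatory", some (390, 460)), ("Respiratory", some (460, 520)),
   ("Digestive", some (520, 580)), ("Genitourinary", some (580, 630)),
   ("Complications_Pregnancy_Childbirth", some (630, 680)), ("Skin", some (680, 710)),
   ("Musculoskeletal", some (710, 740)), ("Congenital_Anomaly", some (740, 760)),
   ("Perinatal_Conditions", some (760, 780)), ("Symptoms_&_Ill-defined", some (780, 800)),
   ("Injury_&_Poisining", some (800, 1000)),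
   ("Supplementary_V_Codes", none), ("Supplementary_E_Codes", none)]

-- the for-loop: first category whose range contains code_num (isinstance check = the `some` match)
def scanCategories (n : Int) : List (String × Option (Int × Int)) → Option String
  | [] => none
  | (cat, r) :: rest =>
    match r with
    | some (a, b) => if a ≤ n ∧ n < b then some cat else scanCategories n rest
    | none => scanCategories n rest

def map_diag_code (code : String) : Option String :=
  if code = "" || PySem.Str.strip code = "00000" || PySem.Str.strip code = "" then none
  else if PySem.Str.startswith code "V" then some "Supplementary_V_Codes"
  else if PySem.Str.startswith code "E" then some "Supplementary_E_Codes"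
  else
    match PySem.Int.ofStr? (PySem.Str.slice code none (some 3)) with
    | none => none          -- int(...) raised ValueError
    | some n =>
      match scanCategories n diagCategories with
      | some cat => some cat
      | none => some "Other"

-- ===== PORT B =====
def altBounds : List Int :=
  [0, 140, 240, 280, 290, 320, 390, 460, 520, 580, 630, 680, 710, 740, 760, 780, 800, 1000]

def altNames : List String :=
  ["Infection_&_Parasitic", "Neoplasm", "Endocrine_Nutritional_Immunity",
   "Blood", "Mental_&_Behavioral", "Nervous", "Circulatory", "Respiratory",
   "Digestive", "Genitourinary", "Complications_Pregnancy_Childbirth",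
   "Skin", "Musculoskeletal", "Congenital_Anomaly", "Perinatal_Conditions",
   "Symptoms_&_Ill-defined", "Injury_&_Poisining"]

-- the while-loop of Source B: bisect_right over altBounds (_BOUNDS[mid] always in range)
def bisectLoop (n : Int) (lo hi : Nat) : Nat :=
  if lo < hi then
    let mid := (lo + hi) / 2
    if altBounds.getD mid 0 ≤ n then bisectLoop n (mid + 1) hi
    else bisectLoop n lo mid
  else lo
termination_by hi - lo
decreasing_by all_goals omega

def map_diag_code_alt (code : String) : Option String :=
  if code = "" || PySem.Str.strip code = "00000" || PySem.Str.strip code = "" then none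
  else if PySem.Str.startswith code "V" then some "Supplementary_V_Codes"
  else if PySem.Str.startswith code "E" then some "Supplementary_E_Codes"
  else
    match PySem.Int.ofStr? (PySem.Str.slice code none (some 3)) with
    | none => none          -- int(...) raised ValueError
    | some n =>
      let i : Int := (bisectLoop n 0 altBounds.length : Int) - 1
      if 0 ≤ i ∧ i < altNames.length then some (altNames.getD i.toNat "")
      else some "Other"

-- ===== PRECONDITION & SPEC =====
def Spec_map_diag_code (code : String) (out : Option String) : Prop := out = map_diag_code_alt code
instance (code : String) (out : Option String) : Decidable (Spec_map_diag_code code out) := by unfold Spec_map_diag_code; infer_instance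

-- ===== CLAIM (what is proved, stated in full; the proofs are below) =====
def Claim_equal_map_diag_code : Prop := ∀ (code : String), Dom_map_diag_code code → Spec_map_diag_code code (map_diag_code code)

-- ===== LEMMAS AND PROOFS =====
-- the two lookups agree for every integer code_num
lemma lookup_eq (n : Int) :
    (match scanCategories n diagCategories with
     | some cat => some cat
     | none => some "Other")
    = (let i : Int := (bisectLoop n 0 altBounds.length : Int) - 1;
       if 0 ≤ i ∧ i < altNames.length then some (altNames.getD i.toNat "")
       else some "Other") := by
  by_cases h0 : n < 0
  · simp only [scanCategories, diagCategories]
    repeat first | rw [if_pos (by omega)] | rw [if_neg (by omega)]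
    have hb : bisectLoop n 0 altBounds.length = 0 := by
      repeat (rw [bisectLoop]; norm_num [altBounds]; try first | rw [if_pos (by omega)] | rw [if_neg (by omega)])
    rw [hb]
    norm_num [altNames]
    try rfl
  by_cases h1 : n < 140
  · simp only [scanCategories, diagCategories]
    repeat first | rw [if_pos (by omega)] | rw [if_neg (by omega)]
    have hb : bisectLoop n 0 altBounds.length = 1 := by
      repeat (rw [bisectLoop]; norm_num [altBounds]; try first | rw [if_pos (by omega)] | rw [if_neg (by omega)])
    rw [hb]
    norm_num [altNames]
    try rfl
  by_cases h2 : n < 240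
  · simp only [scanCategories, diagCategories]
    repeat first | rw [if_pos (by omega)] | rw [if_neg (by omega)]
    have hb : bisectLoop n 0 altBounds.length = 2 := by
      repeat (rw [bisectLoop]; norm_num [altBounds]; try first | rw [if_pos (by omega)] | rw [if_neg (by omega)])
    rw [hb]
    norm_num [altNames]
    try rfl
  by_cases h3 : n < 280
  · simp only [scanCategories, diagCategories]
    repeat first | rw [if_pos (by omega)] | rw [if_neg (by omega)]
    have hb : bisectLoop n 0 altBounds.length = 3 := by
      repeat (rw [bisectLoop]; norm_num [altBounds]; try first | rw [if_pos (by omega)] | rw [if_neg (by omega)])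
    rw [hb]
    norm_num [altNames]
    try rfl
  by_cases h4 : n < 290
  · simp only [scanCategories, diagCategories]
    repeat first | rw [if_pos (by omega)] | rw [if_neg (by omega)]
    have hb : bisectLoop n 0 altBounds.length = 4 := by
      repeat (rw [bisectLoop]; norm_num [altBounds]; try first | rw [if_pos (by omega)] | rw [if_neg (by omega)])
    rw [hb]
    norm_num [altNames]
    try rfl
  by_cases h5 : n < 320
  · simp only [scanCategories, diagCategories]
    repeat first | rw [if_pos (by omega)] | rw [if_neg (by omega)]
    have hb : bisectLoop n 0 altBounds.length = 5 := by
      repeat (rw [bisectLoop]; norm_num [altBounds]; try first | rw [if_pos (by omega)] | rw [if_neg (by omega)])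
    rw [hb]
    norm_num [altNames]
    try rfl
  by_cases h6 : n < 390
  · simp only [scanCategories, diagCategories]
    repeat first | rw [if_pos (by omega)] | rw [if_neg (by omega)]
    have hb : bisectLoop n 0 altBounds.length = 6 := by
      repeat (rw [bisectLoop]; norm_num [altBounds]; try first | rw [if_pos (by omega)] | rw [if_neg (by omega)])
    rw [hb]
    norm_num [altNames]
    try rfl
  by_cases h7 : n < 460
  · simp only [scanCategories, diagCategories]
    repeat first | rw [if_pos (by omega)] | rw [if_neg (by omega)]
    have hb : bisectLoop n 0 altBounds.length = 7 := by
      repeat (rw [bisectLoop]; norm_num [altBounds]; try first | rw [if_pos (by omega)] | rw [if_neg (by omega)])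
    rw [hb]
    norm_num [altNames]
    try rfl
  by_cases h8 : n < 520
  · simp only [scanCategories, diagCategories]
    repeat first | rw [if_pos (by omega)] | rw [if_neg (by omega)]
    have hb : bisectLoop n 0 altBounds.length = 8 := by
      repeat (rw [bisectLoop]; norm_num [altBounds]; try first | rw [if_pos (by omega)] | rw [if_neg (by omega)])
    rw [hb]
    norm_num [altNames]
    try rfl
  by_cases h9 : n < 580
  · simp only [scanCategories, diagCategories]
    repeat first | rw [if_pos (by omega)] | rw [if_neg (by omega)]
    have hb : bisectLoop n 0 altBounds.length = 9 := by
      repeat (rw [bisectLoop]; norm_num [altBounds]; try first | rw [if_pos (by omega)] | rw [if_neg (by omega)])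
    rw [hb]
    norm_num [altNames]
    try rfl
  by_cases h10 : n < 630
  · simp only [scanCategories, diagCategories]
    repeat first | rw [if_pos (by omega)] | rw [if_neg (by omega)]
    have hb : bisectLoop n 0 altBounds.length = 10 := by
      repeat (rw [bisectLoop]; norm_num [altBounds]; try first | rw [if_pos (by omega)] | rw [if_neg (by omega)])
    rw [hb]
    norm_num [altNames]
    try rfl
  by_cases h11 : n < 680
  · simp only [scanCategories, diagCategories]
    repeat first | rw [if_pos (by omega)] | rw [if_neg (by omega)]
    have hb : bisectLoop n 0 altBounds.length = 11 := by
      repeat (rw [bisectLoop]; norm_num [altBounds]; try first | rw [if_pos (by omega)] | rw [if_neg (by omega)])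
    rw [hb]
    norm_num [altNames]
    try rfl
  by_cases h12 : n < 710
  · simp only [scanCategories, diagCategories]
    repeat first | rw [if_pos (by omega)] | rw [if_neg (by omega)]
    have hb : bisectLoop n 0 altBounds.length = 12 := by
      repeat (rw [bisectLoop]; norm_num [altBounds]; try first | rw [if_pos (by omega)] | rw [if_neg (by omega)])
    rw [hb]
    norm_num [altNames]
    try rfl
  by_cases h13 : n < 740
  · simp only [scanCategories, diagCategories]
    repeat first | rw [if_pos (by omega)] | rw [if_neg (by omega)]
    have hb : bisectLoop n 0 altBounds.length = 13 := by
      repeat (rw [bisectLoop]; norm_num [altBounds]; try first | rw [if_pos (by omega)] | rw [if_neg (by omega)])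
    rw [hb]
    norm_num [altNames]
    try rfl
  by_cases h14 : n < 760
  · simp only [scanCategories, diagCategories]
    repeat first | rw [if_pos (by omega)] | rw [if_neg (by omega)]
    have hb : bisectLoop n 0 altBounds.length = 14 := by
      repeat (rw [bisectLoop]; norm_num [altBounds]; try first | rw [if_pos (by omega)] | rw [if_neg (by omega)])
    rw [hb]
    norm_num [altNames]
    try rfl
  by_cases h15 : n < 780
  · simp only [scanCategories, diagCategories]
    repeat first | rw [if_pos (by omega)] | rw [if_neg (by omega)]
    have hb : bisectLoop n 0 altBounds.length = 15 := by
      repeat (rw [bisectLoop]; norm_num [altBounds]; try first | rw [if_pos (by omega)] | rw [if_neg (by omega)])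
    rw [hb]
    norm_num [altNames]
    try rfl
  by_cases h16 : n < 800
  · simp only [scanCategories, diagCategories]
    repeat first | rw [if_pos (by omega)] | rw [if_neg (by omega)]
    have hb : bisectLoop n 0 altBounds.length = 16 := by
      repeat (rw [bisectLoop]; norm_num [altBounds]; try first | rw [if_pos (by omega)] | rw [if_neg (by omega)])
    rw [hb]
    norm_num [altNames]
    try rfl
  by_cases h17 : n < 1000
  · simp only [scanCategories, diagCategories]
    repeat first | rw [if_pos (by omega)] | rw [if_neg (by omega)]
    have hb : bisectLoop n 0 altBounds.length = 17 := by
      repeat (rw [bisectLoop]; norm_num [altBounds]; try first | rw [if_pos (by omega)] | rw [if_neg (by omega)])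
    rw [hb]
    norm_num [altNames]
    try rfl
  · simp only [scanCategories, diagCategories]
    repeat first | rw [if_pos (by omega)] | rw [if_neg (by omega)]
    have hb : bisectLoop n 0 altBounds.length = 18 := by
      repeat (rw [bisectLoop]; norm_num [altBounds]; try first | rw [if_pos (by omega)] | rw [if_neg (by omega)])
    rw [hb]
    norm_num [altNames]
    try rfl

-- ===== VERDICT (by name: the statement is the Claim_ definition above) =====
set_option maxHeartbeats 1000000 in
theorem map_diag_code_spec : Claim_equal_map_diag_code := by
  intro code _
  unfold Spec_map_diag_code map_diag_code map_diag_code_alt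
  cases hr : PySem.Int.ofStr? (PySem.Str.slice code none (some 3)) with
  | none => split_ifs <;> rfl
  | some n =>
    split_ifs <;> try rfl
    exact lookup_eq n
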